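-- pv_equiv track=rewrite | github.com/fstetler/Python-course | Test_1.py | is_program
-- ===== SOURCE A (Python) =====
-- import string
-- import string
--
-- def is_program(s):
-- 	s = s.lower()
-- 	letters = string.ascii_lowercase
-- 	lettersInString = []
-- 	b = []
-- 	c = []
-- 	for i in s:
-- 		if i in letters:
-- 			lettersInString.append(i)
-- 	for i in letters:
-- 		if i in lettersInString:
-- 			b = 1
-- 			c.append(b)
-- 		else:
-- 			b = 0
-- 			c.append(b)
--
-- 	if 0 in c:
-- 		return False
-- 	else:
-- 		return True
-- ===== SOURCE B (Python) =====
-- def is_program(s):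
--     mask = 0
--     for ch in s.lower():
--         o = ord(ch)
--         if 97 <= o <= 122:
--             mask |= 1 << (o - 97)
--     return mask == (1 << 26) - 1
-- ===== Notes on version B (the rewrite author's own statement) =====
-- stated objective: faster
-- what changed: Single pass maintaining a 26-bit presence bitmask (one bit per letter set via ord arithmetic) and returning whether the mask is full, instead of A's two staged passes building a filtered letter list and a 0/1 flag list scanned for 0.
import Mathlib
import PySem

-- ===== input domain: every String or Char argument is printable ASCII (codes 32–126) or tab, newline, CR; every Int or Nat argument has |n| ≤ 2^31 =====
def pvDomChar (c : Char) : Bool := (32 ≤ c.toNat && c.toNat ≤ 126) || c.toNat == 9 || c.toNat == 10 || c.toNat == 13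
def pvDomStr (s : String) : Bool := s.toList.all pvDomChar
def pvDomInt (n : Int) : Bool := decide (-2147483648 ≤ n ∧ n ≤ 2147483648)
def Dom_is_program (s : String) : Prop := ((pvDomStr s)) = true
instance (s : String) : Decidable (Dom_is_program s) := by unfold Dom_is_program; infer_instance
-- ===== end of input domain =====

set_option maxHeartbeats 1000000


-- B replaces A's two staged passes (filtered letter list, 0/1 flag list) with a single
-- pass maintaining a 26-bit presence bitmask (objective: faster in a timing run; bitmask replaces the per-letter membership scans).

-- ===== PORT A =====
-- string.ascii_lowercase
def pvAlphabet : List Char := "abcdefghijklmnopqrstuvwxyz".toList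

def is_program (s : String) : Bool :=
  let sl := (PySem.Str.lower s).toList
  let lettersInString :=
    sl.foldl (fun acc i => if i ∈ pvAlphabet then acc ++ [i] else acc) []
  let c :=
    pvAlphabet.foldl (fun acc i =>
      if i ∈ lettersInString then acc ++ [(1 : Int)] else acc ++ [(0 : Int)]) []
  if (0 : Int) ∈ c then false else true

-- ===== PORT B =====
-- o = ord(ch) inlined as ch.toNat
def pvStep (m : Nat) (ch : Char) : Nat :=
  if 97 ≤ ch.toNat ∧ ch.toNat ≤ 122 then m ||| (1 <<< (ch.toNat - 97)) else m

def is_program_alt (s : String) : Bool :=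
  let mask := (PySem.Str.lower s).toList.foldl pvStep 0
  mask == (1 <<< 26) - 1

-- ===== PRECONDITION & SPEC =====
def Spec_is_program (s : String) (out : Bool) : Prop := out = is_program_alt s
instance (s : String) (out : Bool) : Decidable (Spec_is_program s out) := by unfold Spec_is_program; infer_instance

-- ===== CLAIM (what is proved, stated in full; the proofs are below) =====
def Claim_equal_is_program : Prop := ∀ (s : String), Dom_is_program s → Spec_is_program s (is_program s)

-- ===== LEMMAS AND PROOFS =====

theorem pvFlagFold (L M : List Char) (acc : List Int) :
    M.foldl (fun acc i => if i ∈ L then acc ++ [(1 : Int)] else acc ++ [(0 : Int)]) acc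
      = acc ++ M.map (fun i => if i ∈ L then (1 : Int) else 0) := by
  induction M generalizing acc with
  | nil => simp
  | cons x xs ih =>
    rw [List.foldl_cons, ih, List.map_cons]
    split <;> simp

theorem is_program_eq_all (s : String) :
    is_program s = pvAlphabet.all (fun i => decide (i ∈ (PySem.Str.lower s).toList)) := by
  simp only [is_program]
  rw [PySem.List.foldl_append_ite_eq_filter, pvFlagFold]
  simp only [List.nil_append]
  by_cases hall : ∀ i ∈ pvAlphabet, i ∈ (PySem.Str.lower s).toList
  · rw [if_neg, eq_comm, List.all_eq_true]
    · intro i hi; simpa using hall i hi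
    · simp only [List.mem_map, not_exists, not_and]
      intro i hi
      rw [if_pos]
      · simp
      · simp only [List.mem_filter]
        exact ⟨hall i hi, by simpa using hi⟩
  · push Not at hall
    obtain ⟨i, hi, hni⟩ := hall
    rw [if_pos, eq_comm, List.all_eq_false]
    · exact ⟨i, hi, by simpa using hni⟩
    · refine List.mem_map.mpr ⟨i, hi, ?_⟩
      rw [if_neg]
      simp only [List.mem_filter, not_and]
      intro hmem; exact absurd hmem hni

-- bit j of the folded mask records whether a letter with code 97+j occurs
theorem pvFoldTestBit (M : List Char) (m : Nat) (j : Nat) :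
    (M.foldl pvStep m).testBit j
      = (m.testBit j || M.any (fun c => decide (97 ≤ c.toNat ∧ c.toNat ≤ 122 ∧ c.toNat - 97 = j))) := by
  induction M generalizing m with
  | nil => simp
  | cons x xs ih =>
    rw [List.foldl_cons, ih, List.any_cons]
    unfold pvStep
    split
    · rename_i h
      rw [Nat.testBit_or, Nat.one_shiftLeft, Nat.testBit_two_pow]
      by_cases hj : x.toNat - 97 = j
      · simp [hj, h]
      · simp [hj, h]
    · rename_i h
      have : ¬ (97 ≤ x.toNat ∧ x.toNat ≤ 122 ∧ x.toNat - 97 = j) := fun hc => h ⟨hc.1, hc.2.1⟩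
      simp [this]

theorem pvFoldHighBits (M : List Char) (j : Nat) (hj : 26 ≤ j) :
    (M.foldl pvStep 0).testBit j = false := by
  rw [pvFoldTestBit]
  simp only [Nat.zero_testBit, Bool.false_or, List.any_eq_false]
  intro c _
  simp only [decide_eq_true_eq]
  omega

theorem pvCharEqIffToNat (c : Char) (j : Nat) (hj : j < 26) :
    c = Char.ofNat (97 + j) ↔ c.toNat = 97 + j := by
  have hv : (Char.ofNat (97 + j)).toNat = 97 + j := by
    rw [Char.toNat_ofNat, if_pos (by omega)]
  constructor
  · intro h; rw [h, hv]
  · intro h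
    apply Char.ext
    exact UInt32.toNat_inj.mp (h.trans hv.symm)

theorem pvPresentIff (M : List Char) (j : Nat) (hj : j < 26) :
    M.any (fun c => decide (97 ≤ c.toNat ∧ c.toNat ≤ 122 ∧ c.toNat - 97 = j))
      = decide (Char.ofNat (97 + j) ∈ M) := by
  rw [Bool.eq_iff_iff]
  simp only [List.any_eq_true, decide_eq_true_eq]
  constructor
  · rintro ⟨c, hc, h1, h2, h3⟩
    have : c = Char.ofNat (97 + j) := (pvCharEqIffToNat c j hj).mpr (by omega)
    exact this ▸ hc
  · intro h
    refine ⟨Char.ofNat (97 + j), h, ?_⟩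
    have := (pvCharEqIffToNat (Char.ofNat (97 + j)) j hj).mp rfl
    omega

theorem pvAlphabetMap : pvAlphabet = (List.range 26).map (fun j => Char.ofNat (97 + j)) := by
  decide

theorem is_program_alt_eq_all (s : String) :
    is_program_alt s = pvAlphabet.all (fun i => decide (i ∈ (PySem.Str.lower s).toList)) := by
  unfold is_program_alt
  set M := (PySem.Str.lower s).toList with hM
  rw [Bool.eq_iff_iff, beq_iff_eq, pvAlphabetMap, List.all_map, List.all_eq_true]
  constructor
  · intro h j hj
    have hj26 : j < 26 := List.mem_range.mp hj
    have hb : (M.foldl pvStep 0).testBit j = true := by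
      rw [h]
      have : (1 <<< 26 : Nat) - 1 = 2 ^ 26 - 1 := by norm_num [Nat.one_shiftLeft]
      rw [this, Nat.testBit_two_pow_sub_one]
      simpa using hj26
    rw [pvFoldTestBit, Nat.zero_testBit, Bool.false_or, pvPresentIff M j hj26] at hb
    simpa using hb
  · intro h
    apply Nat.eq_of_testBit_eq
    intro j
    have hrhs : ((1 <<< 26 : Nat) - 1).testBit j = decide (j < 26) := by
      have : (1 <<< 26 : Nat) - 1 = 2 ^ 26 - 1 := by norm_num [Nat.one_shiftLeft]
      rw [this, Nat.testBit_two_pow_sub_one]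
    by_cases hj : j < 26
    · rw [hrhs, pvFoldTestBit, Nat.zero_testBit, Bool.false_or, pvPresentIff M j hj]
      have := h j (List.mem_range.mpr hj)
      simp only [Function.comp, decide_eq_true_eq] at this
      simp [hj, this]
    · rw [hrhs, pvFoldHighBits M j (by omega)]
      simp [hj]

-- ===== VERDICT (by name: the statement is the Claim_ definition above) =====
theorem is_program_spec : Claim_equal_is_program := by
  intro s _
  unfold Spec_is_program
  rw [is_program_eq_all, is_program_alt_eq_all]
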